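-- pv_equiv track=rewrite | github.com/leecaitl/storytelling | randomListGenerator.py | splitByBodyType
-- ===== SOURCE A (Python) =====
-- def splitByBodyType(files):
--     bodyTypes = {}
--
--     for f in files:
--         bt = f.split("_")[0]
--         if bt not in bodyTypes:
--             bodyTypes[bt] = []
--         bodyTypes[bt].append(f)
--
--     return bodyTypes
-- ===== SOURCE B (Python) =====
-- def splitByBodyType(files):
--     keys = list(dict.fromkeys(f.split("_")[0] for f in files))
--     return {k: [f for f in files if f.split("_")[0] == k] for k in keys}
-- ===== Notes on version B (the rewrite author's own statement) =====
-- stated objective: simpler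
-- what changed: Replaces the single mutating bucket-append loop over a dict with a two-phase comprehension: dedup the underscore prefixes in first-occurrence order, then build each group by filtering the whole list per key.
import Mathlib
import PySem

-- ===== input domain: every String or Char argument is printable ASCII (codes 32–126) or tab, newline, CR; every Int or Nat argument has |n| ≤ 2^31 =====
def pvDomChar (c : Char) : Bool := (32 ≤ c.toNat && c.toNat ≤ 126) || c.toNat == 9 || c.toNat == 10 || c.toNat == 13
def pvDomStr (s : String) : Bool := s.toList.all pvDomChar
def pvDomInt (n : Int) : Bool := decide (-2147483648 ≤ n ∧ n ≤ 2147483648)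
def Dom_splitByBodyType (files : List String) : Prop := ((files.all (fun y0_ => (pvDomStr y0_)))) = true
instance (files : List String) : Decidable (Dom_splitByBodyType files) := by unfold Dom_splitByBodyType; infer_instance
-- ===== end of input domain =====

-- B replaces A's single mutating bucket-append loop with a dedup-the-keys-then-filter-per-key comprehension (simpler decomposition, same dict).

-- shared key expression of both Pythons: f.split("_")[0] ("_" is nonempty, so split returns a nonempty list and [0] never raises)
def pvKey (f : String) : String := ((PySem.Str.split? f "_").getD []).headD ""

-- ===== PORT A =====
def splitByBodyType (files : List String) : List (String × List String) :=
  (files.foldl (fun d f =>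
    let bt := pvKey f
    let d := if d.contains bt then d else d.insert bt ([] : List String)
    d.modify bt [] (fun l => l ++ [f])) PySem.Dict.empty).items

-- ===== PORT B =====
-- list(dict.fromkeys(…)) is PySem.List.dedup; the dict comprehension over these distinct
-- keys inserts each key once, so its items are exactly this map in key order
def splitByBodyType_alt (files : List String) : List (String × List String) :=
  (PySem.List.dedup (files.map pvKey)).map
    (fun k => (k, files.filter (fun f => pvKey f == k)))

-- ===== PRECONDITION & SPEC =====
def Spec_splitByBodyType (files : List String) (out : List (String × List String)) : Prop := out = splitByBodyType_alt files
instance (files : List String) (out : List (String × List String)) : Decidable (Spec_splitByBodyType files out) := by unfold Spec_splitByBodyType; infer_instance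

-- ===== CLAIM (what is proved, stated in full; the proofs are below) =====
def Claim_equal_splitByBodyType : Prop := ∀ (files : List String), Dom_splitByBodyType files → Spec_splitByBodyType files (splitByBodyType files)

-- ===== LEMMAS AND PROOFS =====

-- A's "if key missing, insert []; then append" step is exactly a modify with default []
theorem stepA_eq_modify (d : PySem.Dict String (List String)) (f : String) :
    (let bt := pvKey f
     let d := if d.contains bt then d else d.insert bt ([] : List String)
     d.modify bt [] (fun l => l ++ [f]))
    = d.modify (pvKey f) [] (fun l => l ++ [f]) := by
  by_cases h : d.contains (pvKey f)
  · simp [h]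
  · simp only [h, Bool.false_eq_true, if_false]
    simp [pysem, PySem.Dict.modify, h]

-- A's loop rewritten as the standard (key, value)-pair grouping loop
theorem loopA_eq_modify (files : List String) :
    files.foldl (fun d f =>
      let bt := pvKey f
      let d := if d.contains bt then d else d.insert bt ([] : List String)
      d.modify bt [] (fun l => l ++ [f])) PySem.Dict.empty
    = (files.map (fun f => (pvKey f, f))).foldl
        (fun d p => d.modify p.1 [] (fun l => l ++ [p.2])) PySem.Dict.empty := by
  rw [List.foldl_map]
  exact PySem.List.foldl_congr_mem files _ _ _ (fun d f _ => stepA_eq_modify d f)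

-- ===== VERDICT (by name: the statement is the Claim_ definition above) =====
theorem splitByBodyType_spec : Claim_equal_splitByBodyType := by
  intro files _
  show _ = _
  unfold splitByBodyType splitByBodyType_alt
  rw [loopA_eq_modify]
  set pairs := files.map (fun f => (pvKey f, f)) with hp
  set d := pairs.foldl (fun d p => d.modify p.1 [] (fun l => l ++ [p.2])) PySem.Dict.empty with hd
  have hnd : d.keys.Nodup :=
    PySem.Dict.nodup_keys_foldl_modify_key pairs Prod.fst [] (fun d p => (· ++ [p.2])) _
      PySem.Dict.nodup_keys_empty
  have hkeys : d.keys = PySem.List.dedup (files.map pvKey) := by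
    rw [hd, PySem.Dict.keys_foldl_modify_key (key := Prod.fst)]
    simp [hp, List.map_map, PySem.Set.update_nil_left]
    rfl
  rw [PySem.Dict.items_eq_map_keys d hnd [], hkeys]
  apply List.map_congr_left
  intro k hk
  have hval : d.getD k [] = files.filter (fun f => pvKey f == k) := by
    rw [hd, PySem.Dict.getD_foldl_modify_append]
    simp [hp, List.filter_map, Function.comp_def, List.map_map]
  rw [hval]
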